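-- pv_equiv track=rewrite | github.com/AdamayB/OS_Lab_Codes | PriorityScheduling.py | findWaitingTime
-- ===== SOURCE A (Python) =====
-- def findWaitingTime(processes, n, wt):
--     wt[0] = 0
--     ct=[0]*n
--     ct[0]=processes[0][1]
--     # calculating waiting time
--     for i in range(1, n):
--         wt[i] = processes[i - 1][1] + wt[i - 1]
--         ct[i]=processes[i][1]+wt[i]
--     return wt,ct
-- ===== SOURCE B (Python) =====
-- def findWaitingTime(processes, n, wt):
--     # completion times: a prefix-sum recurrence ct[i] = ct[i-1] + burst[i]
--     ct = [0] * n
--     ct[0] = processes[0][1]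
--     for i in range(1, n):
--         ct[i] = ct[i - 1] + processes[i][1]
--     # waiting time of i is its completion time minus its own burst
--     wt[0] = 0
--     for i in range(1, n):
--         wt[i] = ct[i] - processes[i][1]
--     return wt, ct
-- ===== Notes on version B (the rewrite author's own statement) =====
-- stated objective: alternative
-- what changed: Replaces A's coupled single loop (wt[i] from wt[i-1], ct[i] from wt[i]) with two independent passes: ct as a prefix-sum recurrence over bursts, then wt[i] = ct[i] - burst[i].
import Mathlib
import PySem

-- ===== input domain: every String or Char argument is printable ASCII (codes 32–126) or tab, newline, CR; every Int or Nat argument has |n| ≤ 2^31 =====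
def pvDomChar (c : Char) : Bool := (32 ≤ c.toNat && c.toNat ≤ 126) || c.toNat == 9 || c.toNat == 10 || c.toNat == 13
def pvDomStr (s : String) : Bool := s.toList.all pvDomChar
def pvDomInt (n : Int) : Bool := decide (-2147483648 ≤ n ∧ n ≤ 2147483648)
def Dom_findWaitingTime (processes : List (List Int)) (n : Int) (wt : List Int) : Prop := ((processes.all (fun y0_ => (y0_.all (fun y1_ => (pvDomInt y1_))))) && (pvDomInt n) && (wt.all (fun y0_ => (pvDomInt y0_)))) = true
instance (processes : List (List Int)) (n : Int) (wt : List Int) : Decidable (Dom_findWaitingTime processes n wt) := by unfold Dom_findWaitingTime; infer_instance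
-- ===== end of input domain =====

-- B replaces A's coupled wt/ct recurrence with two independent passes (prefix-sum ct, then wt = ct - burst);
-- Python A and B mutate the wt argument in place — the equivalence proved here is about the RETURN value only.

-- ===== PORT A =====
def findWaitingTime (processes : List (List Int)) (n : Int) (wt : List Int) : List Int × List Int :=
  let wt1 := PySem.List.pySetD wt 0 0
  let ct0 := List.replicate n.toNat (0 : Int)
  let ct1 := PySem.List.pySetD ct0 0 (PySem.List.pyGetD (PySem.List.pyGetD processes 0 []) 1 0)
  (PySem.List.pyRange 1 n 1).foldl
    (fun st i =>
      let w := PySem.List.pySetD st.1 i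
        (PySem.List.pyGetD (PySem.List.pyGetD processes (i - 1) []) 1 0 + PySem.List.pyGetD st.1 (i - 1) 0)
      let c := PySem.List.pySetD st.2 i
        (PySem.List.pyGetD (PySem.List.pyGetD processes i []) 1 0 + PySem.List.pyGetD w i 0)
      (w, c))
    (wt1, ct1)

-- ===== PORT B =====
def findWaitingTime_alt (processes : List (List Int)) (n : Int) (wt : List Int) : List Int × List Int :=
  let ct0 := List.replicate n.toNat (0 : Int)
  let ct1 := PySem.List.pySetD ct0 0 (PySem.List.pyGetD (PySem.List.pyGetD processes 0 []) 1 0)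
  let ct := (PySem.List.pyRange 1 n 1).foldl
      (fun c i => PySem.List.pySetD c i
        (PySem.List.pyGetD c (i - 1) 0 + PySem.List.pyGetD (PySem.List.pyGetD processes i []) 1 0))
      ct1
  let wt1 := PySem.List.pySetD wt 0 0
  let wt2 := (PySem.List.pyRange 1 n 1).foldl
      (fun w i => PySem.List.pySetD w i
        (PySem.List.pyGetD ct i 0 - PySem.List.pyGetD (PySem.List.pyGetD processes i []) 1 0))
      wt1
  (wt2, ct)

-- ===== PRECONDITION & SPEC =====
-- Pre_ excludes exactly the inputs on which Python A raises IndexError: n < 1, wt or processes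
-- shorter than n, or one of the first n process records lacking a burst entry at index 1.
def Pre_findWaitingTime (processes : List (List Int)) (n : Int) (wt : List Int) : Prop :=
  1 ≤ n ∧ n ≤ (wt.length : Int) ∧ n ≤ (processes.length : Int) ∧
    ∀ p ∈ processes.take n.toNat, 2 ≤ p.length
instance (processes : List (List Int)) (n : Int) (wt : List Int) : Decidable (Pre_findWaitingTime processes n wt) := by unfold Pre_findWaitingTime; infer_instance
def pvWitness_findWaitingTime : List (List Int) × Int × List Int := ([[1, 5], [2, 3]], 2, [0, 0])

def Spec_findWaitingTime (processes : List (List Int)) (n : Int) (wt : List Int) (out : List Int × List Int) : Prop := out = findWaitingTime_alt processes n wt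
instance (processes : List (List Int)) (n : Int) (wt : List Int) (out : List Int × List Int) : Decidable (Spec_findWaitingTime processes n wt out) := by unfold Spec_findWaitingTime; infer_instance

-- ===== CLAIM (what is proved, stated in full; the proofs are below) =====
def Claim_equal_findWaitingTime : Prop := ∀ (processes : List (List Int)) (n : Int) (wt : List Int), Dom_findWaitingTime processes n wt → Pre_findWaitingTime processes n wt → Spec_findWaitingTime processes n wt (findWaitingTime processes n wt)


-- ===== LEMMAS AND PROOFS =====

-- burst time of process j (default-valued, as both ports read it), and the prefix sum of the first k bursts
def pvBurst (processes : List (List Int)) (j : Nat) : Int :=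
  PySem.List.pyGetD (processes.getD j []) 1 0

def pvS (processes : List (List Int)) : Nat → Int
  | 0 => 0
  | k + 1 => pvS processes k + pvBurst processes k

-- intended intermediate states: wt after the first k entries are filled, ct likewise
def pvW (processes : List (List Int)) (wt : List Int) (k : Nat) : List Int :=
  wt.mapIdx (fun j x => if j < k then pvS processes j else x)

def pvC (processes : List (List Int)) (N k : Nat) : List Int :=
  (List.range N).map (fun j => if j < k then pvS processes (j + 1) else 0)

theorem pySetD_zero {α : Type} (xs : List α) (v : α) : PySem.List.pySetD xs 0 v = xs.set 0 v := by
  cases xs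
  · rfl
  · simp [PySem.List.pySetD, PySem.List.pySet?, PySem.List.pyIdx?]

theorem pvW_set (processes : List (List Int)) (wt : List Int) (k : Nat) :
    (pvW processes wt k).set k (pvS processes k) = pvW processes wt (k + 1) := by
  apply List.ext_getElem
  · simp [pvW]
  · intro j h1 h2
    simp only [pvW, List.getElem_set, List.getElem_mapIdx]
    split_ifs with h3 h4 h5 h5 <;> try omega
    · subst h3; rfl

theorem pvC_set (processes : List (List Int)) (N k : Nat) :
    (pvC processes N k).set k (pvS processes (k + 1)) = pvC processes N (k + 1) := by
  apply List.ext_getElem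
  · simp [pvC]
  · intro j h1 h2
    simp only [pvC, List.getElem_set, List.getElem_map, List.getElem_range]
    split_ifs with h3 h4 h5 h5 <;> try omega
    · subst h3; rfl

theorem pvW_one (processes : List (List Int)) (wt : List Int) :
    wt.set 0 0 = pvW processes wt 1 := by
  apply List.ext_getElem
  · simp [pvW]
  · intro j h1 h2
    simp only [List.getElem_set, pvW, List.getElem_mapIdx]
    split_ifs with h3 h4 h4
    · subst h3; rfl
    · omega
    · omega
    · rfl

theorem pvC_one (processes : List (List Int)) (N : Nat) :
    (List.replicate N (0 : Int)).set 0 (pvBurst processes 0) = pvC processes N 1 := by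
  apply List.ext_getElem
  · simp [pvC]
  · intro j h1 h2
    simp only [List.getElem_set, List.getElem_replicate, pvC, List.getElem_map, List.getElem_range]
    split_ifs with h3 h4 h4
    · subst h3; simp [pvS]
    · omega
    · omega
    · rfl

theorem pvW_getD (processes : List (List Int)) (wt : List Int) (k j : Nat)
    (hj : j < k) (hjl : j < wt.length) :
    (pvW processes wt k).getD j 0 = pvS processes j := by
  rw [List.getD_eq_getElem?_getD, List.getElem?_eq_getElem (by simp [pvW]; omega)]
  simp [pvW, hj]

theorem pvC_getD (processes : List (List Int)) (N k j : Nat)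
    (hj : j < k) (hjN : j < N) :
    (pvC processes N k).getD j 0 = pvS processes (j + 1) := by
  rw [List.getD_eq_getElem?_getD, List.getElem?_eq_getElem (by simp [pvC]; omega)]
  simp [pvC, hj]

theorem pvBurst_cast (processes : List (List Int)) (k : Nat) :
    PySem.List.pyGetD (PySem.List.pyGetD processes (k : Int) []) 1 0 = pvBurst processes k := by
  rw [PySem.List.pyGetD_natCast]; rfl

theorem pvBurst_zero (processes : List (List Int)) :
    PySem.List.pyGetD (PySem.List.pyGetD processes 0 []) 1 0 = pvBurst processes 0 := by
  rw [PySem.List.pyGetD_zero]; rfl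

-- A's loop over range(1, k) lands in state (pvW k, pvC N k)
theorem foldA (processes : List (List Int)) (n : Int) (wt : List Int)
    (hwl : n ≤ (wt.length : Int)) (k : Nat) (hk1 : 1 ≤ k) (hk : (k : Int) ≤ n) :
    (PySem.List.pyRange 1 (k : Int) 1).foldl
      (fun (st : List Int × List Int) i =>
        (PySem.List.pySetD st.1 i
          (PySem.List.pyGetD (PySem.List.pyGetD processes (i - 1) []) 1 0 + PySem.List.pyGetD st.1 (i - 1) 0),
         PySem.List.pySetD st.2 i
          (PySem.List.pyGetD (PySem.List.pyGetD processes i []) 1 0 +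
            PySem.List.pyGetD (PySem.List.pySetD st.1 i
              (PySem.List.pyGetD (PySem.List.pyGetD processes (i - 1) []) 1 0 + PySem.List.pyGetD st.1 (i - 1) 0)) i 0)))
      (PySem.List.pySetD wt 0 0,
       PySem.List.pySetD (List.replicate n.toNat (0 : Int)) 0
         (PySem.List.pyGetD (PySem.List.pyGetD processes 0 []) 1 0))
    = (pvW processes wt k, pvC processes n.toNat k) := by
  induction k with
  | zero => omega
  | succ k ih =>
    by_cases hk0 : k = 0
    · subst hk0
      rw [show ((0 + 1 : Nat) : Int) = (1 : Int) by norm_num, PySem.List.pyRange_one_eq_nil (by omega)]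
      simp only [List.foldl_nil, pySetD_zero, pvBurst_zero]
      rw [pvW_one, pvC_one]
    · have hk1' : (1 : Nat) ≤ k := by omega
      have hstep : ((k : Int) + 1) = ((k + 1 : Nat) : Int) := by push_cast; ring
      rw [← hstep, PySem.List.pyRange_one_succ_right (by exact_mod_cast hk1'),
        List.foldl_append, ih hk1' (by omega)]
      simp only [List.foldl_cons, List.foldl_nil]
      have hkm1 : ((k : Int) - 1) = ((k - 1 : Nat) : Int) := by omega
      have hWg : PySem.List.pyGetD (pvW processes wt k) ((k : Int) - 1) 0 = pvS processes (k - 1) := by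
        rw [hkm1, PySem.List.pyGetD_natCast]
        exact pvW_getD _ _ _ _ (by omega) (by omega)
      have hBm1 : PySem.List.pyGetD (PySem.List.pyGetD processes ((k : Int) - 1) []) 1 0
          = pvBurst processes (k - 1) := by rw [hkm1, pvBurst_cast]
      have hk' : k - 1 + 1 = k := by omega
      have hSk : pvS processes k = pvS processes (k - 1) + pvBurst processes (k - 1) := by
        conv_lhs => rw [← hk']
        rfl
      simp only [hWg, hBm1, pvBurst_cast, PySem.List.pySetD_natCast]
      rw [show pvBurst processes (k - 1) + pvS processes (k - 1) = pvS processes k by rw [hSk]; ring,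
        pvW_set]
      have hWk : PySem.List.pyGetD (pvW processes wt (k + 1)) (k : Int) 0 = pvS processes k := by
        rw [PySem.List.pyGetD_natCast]
        exact pvW_getD _ _ _ _ (by omega) (by omega)
      rw [hWk, show pvBurst processes k + pvS processes k = pvS processes (k + 1) by rw [pvS]; ring,
        pvC_set]

-- B's first loop over range(1, k) turns the initialised ct into pvC N k
theorem foldB1 (processes : List (List Int)) (n : Int) (k : Nat) (hk1 : 1 ≤ k) (hk : (k : Int) ≤ n) :
    (PySem.List.pyRange 1 (k : Int) 1).foldl
      (fun c i => PySem.List.pySetD c i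
        (PySem.List.pyGetD c (i - 1) 0 + PySem.List.pyGetD (PySem.List.pyGetD processes i []) 1 0))
      (PySem.List.pySetD (List.replicate n.toNat (0 : Int)) 0
        (PySem.List.pyGetD (PySem.List.pyGetD processes 0 []) 1 0))
    = pvC processes n.toNat k := by
  induction k with
  | zero => omega
  | succ k ih =>
    by_cases hk0 : k = 0
    · subst hk0
      rw [show ((0 + 1 : Nat) : Int) = (1 : Int) by norm_num, PySem.List.pyRange_one_eq_nil (by omega)]
      simp only [List.foldl_nil, pySetD_zero, pvBurst_zero]
      exact pvC_one processes n.toNat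
    · have hk1' : (1 : Nat) ≤ k := by omega
      have hstep : ((k : Int) + 1) = ((k + 1 : Nat) : Int) := by push_cast; ring
      rw [← hstep, PySem.List.pyRange_one_succ_right (by exact_mod_cast hk1'),
        List.foldl_append, ih hk1' (by omega)]
      simp only [List.foldl_cons, List.foldl_nil]
      have hkm1 : ((k : Int) - 1) = ((k - 1 : Nat) : Int) := by omega
      have hCg : PySem.List.pyGetD (pvC processes n.toNat k) ((k : Int) - 1) 0 = pvS processes k := by
        rw [hkm1, PySem.List.pyGetD_natCast,
          pvC_getD processes n.toNat k (k - 1) (by omega) (by omega), show k - 1 + 1 = k by omega]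
      simp only [hCg, pvBurst_cast, PySem.List.pySetD_natCast]
      rw [show pvS processes k + pvBurst processes k = pvS processes (k + 1) from rfl, pvC_set]

-- B's second loop over range(1, k) turns wt (with wt[0]=0) into pvW k
theorem foldB2 (processes : List (List Int)) (n : Int) (wt : List Int)
    (k : Nat) (hk1 : 1 ≤ k) (hk : (k : Int) ≤ n) :
    (PySem.List.pyRange 1 (k : Int) 1).foldl
      (fun w i => PySem.List.pySetD w i
        (PySem.List.pyGetD (pvC processes n.toNat n.toNat) i 0 -
          PySem.List.pyGetD (PySem.List.pyGetD processes i []) 1 0))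
      (PySem.List.pySetD wt 0 0)
    = pvW processes wt k := by
  induction k with
  | zero => omega
  | succ k ih =>
    by_cases hk0 : k = 0
    · subst hk0
      rw [show ((0 + 1 : Nat) : Int) = (1 : Int) by norm_num, PySem.List.pyRange_one_eq_nil (by omega)]
      simp only [List.foldl_nil, pySetD_zero]
      exact pvW_one processes wt
    · have hk1' : (1 : Nat) ≤ k := by omega
      have hstep : ((k : Int) + 1) = ((k + 1 : Nat) : Int) := by push_cast; ring
      rw [← hstep, PySem.List.pyRange_one_succ_right (by exact_mod_cast hk1'),
        List.foldl_append, ih hk1' (by omega)]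
      simp only [List.foldl_cons, List.foldl_nil]
      have hCk : PySem.List.pyGetD (pvC processes n.toNat n.toNat) (k : Int) 0
          = pvS processes (k + 1) := by
        rw [PySem.List.pyGetD_natCast]
        exact pvC_getD _ _ _ _ (by omega) (by omega)
      simp only [hCk, pvBurst_cast, PySem.List.pySetD_natCast]
      rw [show pvS processes (k + 1) - pvBurst processes k = pvS processes k by rw [pvS]; ring,
        pvW_set]

-- ===== VERDICT (by name: the statement is the Claim_ definition above) =====
theorem findWaitingTime_spec : Claim_equal_findWaitingTime := by
  intro processes n wt _hd hpre
  obtain ⟨hn1, hwl, hpl, hins⟩ := hpre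
  have hn : n = (n.toNat : Int) := by omega
  have hk1 : 1 ≤ n.toNat := by omega
  unfold Spec_findWaitingTime findWaitingTime findWaitingTime_alt
  rw [hn]
  simp only [Int.toNat_natCast]
  rw [foldA processes n wt hwl n.toNat hk1 (by omega)]
  rw [foldB1 processes n n.toNat hk1 (by omega)]
  rw [foldB2 processes n wt n.toNat hk1 (by omega)]
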